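-- pv_equiv track=rewrite | github.com/cristinalakasz/Web-Scaping | fetch_olympic_statistics.py | find_best_country_in_sport
-- ===== SOURCE A (Python) =====
-- def find_best_country_in_sport(
--     results: dict[str, dict[str, int]], medal: str = "Gold"
-- ) -> str:
--     """Given a dictionary with medal stats in a given sport for the Scandinavian countries, return the country
--         that has received the most of the given `medal`.
--
--     Parameters:
--         - results (dict) : a dictionary of country specific medal results in a given sport. The format is:
--                         {"Norway" : {"Gold" : 1, "Silver" : 2, "Bronze" : 3},
--                          "Sweden" : {"Gold" : 1, ....},
--                          "Denmark" : ...
--                         }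
--         - medal (str) : medal type to compare for. Valid parameters: ["Gold" | "Silver" |"Bronze"]. Should be used as a key
--                           to the medal dictionary.
--     Returns:
--         - best (str) : name of the country(ies) leading in number of gold medals in the given sport
--                        If one country leads only, return its name, like for instance 'Norway'
--                        If two countries lead return their names separated with '/' like 'Norway/Sweden'
--                        If all or none of the countries lead, return string 'None'
--     """
--     valid_medals = {"Gold", "Silver", "Bronze"}
--     if medal not in valid_medals:
--         raise ValueError(
--             f"{medal} is invalid parameter for ranking, must be in {valid_medals}"
--         )
--
--     # Initialize the best country and the maximum medal count
--     best_country = []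
--     max_medals = 0
--
--     # Iterate over each country and its medal counts
--     for country, medals in results.items():
--         # Check if this country has more of the given medal than the current best
--         if medals.get(medal, 0) > max_medals:
--             # Update the best country and the maximum medal count
--             best_country = [country]
--             max_medals = medals[medal]
--         elif medals.get(medal, 0) == max_medals:
--             # If there is a tie, add this country to the list of best countries
--             best_country.append(country)
--
--     # If all or none of the countries lead, return 'None'
--     if len(best_country) in [0, len(results)]:
--         return 'None'
--     else:
--         # Return the name(s) of the best country(ies)
--         return '/'.join(best_country)
-- ===== SOURCE B (Python) =====
-- def find_best_country_in_sport(
--     results: dict[str, dict[str, int]], medal: str = "Gold"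
-- ) -> str:
--     valid_medals = {"Gold", "Silver", "Bronze"}
--     if medal not in valid_medals:
--         raise ValueError(
--             f"{medal} is invalid parameter for ranking, must be in {valid_medals}"
--         )
--     # Pass 1: the winning count (floored at 0, like A's 0-initialised running max).
--     max_medals = max((m.get(medal, 0) for m in results.values()), default=0)
--     max_medals = max(0, max_medals)
--     # Pass 2: all countries attaining it, in insertion order.
--     best = [c for c, m in results.items() if m.get(medal, 0) == max_medals]
--     if len(best) in (0, len(results)):
--         return 'None'
--     return '/'.join(best)
-- ===== Notes on version B (the rewrite author's own statement) =====
-- stated objective: simpler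
-- what changed: Replaces A's single stateful loop (running max with a reset-or-append best list) by two stateless passes: first compute the winning count with max(..., default=0) floored at 0, then a filter comprehension collecting all countries attaining it.
import Mathlib
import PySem

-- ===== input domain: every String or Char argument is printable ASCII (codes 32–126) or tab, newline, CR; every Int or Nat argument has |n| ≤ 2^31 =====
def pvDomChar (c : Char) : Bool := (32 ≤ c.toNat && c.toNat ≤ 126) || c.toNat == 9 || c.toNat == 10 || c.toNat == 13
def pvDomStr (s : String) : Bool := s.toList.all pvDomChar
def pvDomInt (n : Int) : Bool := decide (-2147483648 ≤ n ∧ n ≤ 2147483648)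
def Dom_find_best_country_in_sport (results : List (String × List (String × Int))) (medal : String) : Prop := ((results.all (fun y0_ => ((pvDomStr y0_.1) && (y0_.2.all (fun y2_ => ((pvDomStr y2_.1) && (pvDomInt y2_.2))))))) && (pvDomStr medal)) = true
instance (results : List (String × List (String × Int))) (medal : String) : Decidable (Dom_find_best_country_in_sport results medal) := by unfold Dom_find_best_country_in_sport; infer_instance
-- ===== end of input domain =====

-- B replaces A's single stateful loop (running max + reset-or-append best list) by two
-- stateless passes (compute the winning count, then filter); same cost, simpler shape.

-- ===== PORT A =====
-- A's loop; medal count looked up via dict.get(medal, 0).  In the '>' branch Python reads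
-- medals[medal]; the key is present there (the .get result exceeded max_medals ≥ 0), so it
-- equals the same getD value v.
def find_best_country_in_sport (results : List (String × List (String × Int))) (medal : String) : String :=
  let d := PySem.Dict.ofList results
  let r := d.items.foldl (fun acc p =>
      let v := (PySem.Dict.ofList p.2).getD medal 0
      if v > acc.2 then ([p.1], v)
      else if v == acc.2 then (acc.1 ++ [p.1], acc.2)
      else acc) ([], 0)
  if r.1.length == 0 || r.1.length == d.size then "None"
  else PySem.Str.join "/" r.1

-- ===== PORT B =====
def find_best_country_in_sport_alt (results : List (String × List (String × Int))) (medal : String) : String :=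
  let d := PySem.Dict.ofList results
  let max1 := PySem.List.maxD (d.values.map (fun ms => (PySem.Dict.ofList ms).getD medal 0)) (fun x => x) 0
  let maxm := max 0 max1
  let best := (d.items.filter (fun p => (PySem.Dict.ofList p.2).getD medal 0 == maxm)).map (·.1)
  if best.length == 0 || best.length == d.size then "None"
  else PySem.Str.join "/" best

-- ===== PRECONDITION & SPEC =====
-- Python raises ValueError unless medal is one of the three valid medal names.
def Pre_find_best_country_in_sport (results : List (String × List (String × Int))) (medal : String) : Prop :=
  medal = "Gold" ∨ medal = "Silver" ∨ medal = "Bronze"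
instance (results : List (String × List (String × Int))) (medal : String) : Decidable (Pre_find_best_country_in_sport results medal) := by unfold Pre_find_best_country_in_sport; infer_instance
def pvWitness_find_best_country_in_sport : (List (String × List (String × Int))) × String :=
  ([("Norway", [("Gold", 2), ("Silver", 1)]), ("Sweden", [("Gold", 1)])], "Gold")
def Spec_find_best_country_in_sport (results : List (String × List (String × Int))) (medal : String) (out : String) : Prop := out = find_best_country_in_sport_alt results medal
instance (results : List (String × List (String × Int))) (medal : String) (out : String) : Decidable (Spec_find_best_country_in_sport results medal out) := by unfold Spec_find_best_country_in_sport; infer_instance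

-- ===== CLAIM (what is proved, stated in full; the proofs are below) =====
def Claim_equal_find_best_country_in_sport : Prop := ∀ (results : List (String × List (String × Int))) (medal : String), Dom_find_best_country_in_sport results medal → Pre_find_best_country_in_sport results medal → Spec_find_best_country_in_sport results medal (find_best_country_in_sport results medal)

-- ===== LEMMAS AND PROOFS =====

-- Characterisation of A's loop: starting from (best, m), it returns the running max M of m
-- and the looked-up values, with the list of all keys whose value equals M — prefixed by the
-- incoming best exactly when the max never moved.
theorem loopA_char (v : String × List (String × Int) → Int) :
    ∀ (l : List (String × List (String × Int))) (best : List String) (m : Int),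
    l.foldl (fun acc p =>
        if v p > acc.2 then ([p.1], v p)
        else if v p == acc.2 then (acc.1 ++ [p.1], acc.2)
        else acc) (best, m)
    = ((if l.foldl (fun a p => max a (v p)) m = m then best else [])
        ++ (l.filter (fun p => v p == l.foldl (fun a p => max a (v p)) m)).map (·.1),
       l.foldl (fun a p => max a (v p)) m) := by
  intro l
  induction l with
  | nil => intro best m; simp
  | cons p t ih =>
    intro best m
    have hle := PySem.List.le_foldl_max_int t v (max m (v p))
    simp only [List.foldl_cons]
    by_cases h1 : v p > m
    · rw [if_pos (by exact_mod_cast h1)]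
      have hmax : max m (v p) = v p := by omega
      rw [ih [p.1] (v p)]
      simp only [hmax] at hle ⊢
      have hMm : ¬ t.foldl (fun a p => max a (v p)) (v p) = m := by
        intro h; omega
      rw [if_neg hMm]
      by_cases h2 : t.foldl (fun a p => max a (v p)) (v p) = v p
      · simp [h2]
      · have hne : ¬ (v p == t.foldl (fun a p => max a (v p)) (v p)) = true := by
          simp; omega
        simp [hne, h2]
    · rw [if_neg (by exact_mod_cast h1)]
      have hmax : max m (v p) = m := by omega
      simp only [hmax] at hle ⊢
      by_cases h2 : v p = m
      · rw [if_pos (show (v p == m) = true by simp [h2])]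
        rw [ih (best ++ [p.1]) m]
        by_cases h3 : t.foldl (fun a p => max a (v p)) m = m
        · simp [h3, h2]
        · have hne : ¬ (v p == t.foldl (fun a p => max a (v p)) m) = true := by
            simp; rw [h2]; exact fun h => h3 h.symm
          simp [h3, hne]
      · rw [if_neg (show ¬ (v p == m) = true by simp [h2])]
        rw [ih best m]
        have hne : ¬ (v p == t.foldl (fun a p => max a (v p)) m) = true := by
          simp; omega
        simp [hne]

-- B's max(…, default=0) floored at 0 is exactly A's 0-initialised running max.
theorem maxD_floor_eq (v : String × List (String × Int) → Int) (l : List (String × List (String × Int))) :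
    max 0 (PySem.List.maxD (l.map v) (fun x => x) 0) = l.foldl (fun a p => max a (v p)) 0 := by
  have key : ∀ (t : List Int) (c x : Int), max c (t.foldl max x) = t.foldl max (max c x) := by
    intro t
    induction t with
    | nil => intro c x; simp
    | cons y t ih =>
      intro c x
      simp only [List.foldl_cons]
      rw [ih c (max x y), max_assoc]
  cases l with
  | nil => simp [PySem.List.maxD, PySem.List.max?]
  | cons p t =>
    simp only [List.map_cons, PySem.List.maxD, PySem.List.max?_id_cons, Option.getD_some,
      List.foldl_cons]
    rw [key, List.foldl_map]

-- ===== VERDICT (by name: the statement is the Claim_ definition above) =====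
theorem find_best_country_in_sport_spec : Claim_equal_find_best_country_in_sport := by
  intro results medal _ _
  unfold Spec_find_best_country_in_sport find_best_country_in_sport find_best_country_in_sport_alt
  simp only [loopA_char (fun p => (PySem.Dict.ofList p.2).getD medal 0), PySem.Dict.values,
    List.map_map, Function.comp_def]
  rw [← maxD_floor_eq (fun p => (PySem.Dict.ofList p.2).getD medal 0)]
  simp only [ite_self, List.nil_append]
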